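-- pv_equiv track=rewrite | github.com/syauqylei/Final_Project | PythonPrograms/modules/stencils.py | gen_in_sten_2nd
-- ===== SOURCE A (Python) =====
-- def gen_in_sten_2nd(Nx,Ny):
--     stencils=[]
--     for i in range(Ny):
--         for j in range(Nx):
--             if i==0 or i==Ny-1 or j==0 or j==Nx-1:
--                 continue
--             else:
--                 stencils.append(i*Nx+j)
--     return stencils
-- ===== SOURCE B (Python) =====
-- def gen_in_sten_2nd(Nx, Ny):
--     stencils = []
--     for i in range(1, Ny - 1):
--         stencils.extend(range(i * Nx + 1, i * Nx + Nx - 1))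
--     return stencils
-- ===== Notes on version B (the rewrite author's own statement) =====
-- stated objective: simpler
-- what changed: Replaces the nested cell-by-cell scan with a boundary branch by a single loop over interior rows that emits each row's contiguous block of interior indices as one range.
import Mathlib
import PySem

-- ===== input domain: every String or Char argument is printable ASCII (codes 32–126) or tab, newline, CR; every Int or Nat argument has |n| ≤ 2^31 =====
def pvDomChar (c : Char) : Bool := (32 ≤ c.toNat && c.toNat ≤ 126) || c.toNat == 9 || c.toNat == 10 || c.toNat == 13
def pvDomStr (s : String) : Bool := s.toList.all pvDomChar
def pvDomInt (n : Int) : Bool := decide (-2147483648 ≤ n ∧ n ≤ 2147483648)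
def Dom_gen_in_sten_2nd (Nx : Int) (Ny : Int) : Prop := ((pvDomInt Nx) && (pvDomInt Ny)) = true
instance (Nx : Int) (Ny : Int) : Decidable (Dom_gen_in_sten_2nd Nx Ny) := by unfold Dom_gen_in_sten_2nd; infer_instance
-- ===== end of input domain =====

-- B replaces A's nested cell-by-cell scan (with a boundary branch per cell) by one loop
-- over interior rows that appends each row's contiguous block of interior indices as a range (simpler).

-- ===== PORT A =====
def gen_in_sten_2nd (Nx : Int) (Ny : Int) : List Int :=
  (PySem.List.pyRange 0 Ny 1).foldl (fun stencils i =>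
    (PySem.List.pyRange 0 Nx 1).foldl (fun stencils j =>
      if i = 0 ∨ i = Ny - 1 ∨ j = 0 ∨ j = Nx - 1 then stencils
      else stencils ++ [i * Nx + j]) stencils) []

-- ===== PORT B =====
def gen_in_sten_2nd_alt (Nx : Int) (Ny : Int) : List Int :=
  (PySem.List.pyRange 1 (Ny - 1) 1).foldl (fun stencils i =>
    stencils ++ PySem.List.pyRange (i * Nx + 1) (i * Nx + Nx - 1) 1) []

-- ===== PRECONDITION & SPEC =====
def Spec_gen_in_sten_2nd (Nx : Int) (Ny : Int) (out : List Int) : Prop := out = gen_in_sten_2nd_alt Nx Ny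
instance (Nx : Int) (Ny : Int) (out : List Int) : Decidable (Spec_gen_in_sten_2nd Nx Ny out) := by unfold Spec_gen_in_sten_2nd; infer_instance

-- ===== CLAIM =====
def Claim_equal_gen_in_sten_2nd : Prop := ∀ (Nx : Int) (Ny : Int), Dom_gen_in_sten_2nd Nx Ny → Spec_gen_in_sten_2nd Nx Ny (gen_in_sten_2nd Nx Ny)

-- ===== LEMMAS AND PROOFS =====

-- Shifting a unit-step range by a constant.
lemma pyRange_map_add (c a b : Int) :
    (PySem.List.pyRange a b 1).map (fun j => c + j) = PySem.List.pyRange (c + a) (c + b) 1 := by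
  simp only [PySem.List.pyRange_one, List.map_map]
  have h : c + b - (c + a) = b - a := by ring
  rw [h]
  refine List.map_congr_left ?_
  intro k _
  simp [Function.comp]
  ring

-- A boundary row (i = 0 or i = Ny-1) contributes nothing in A's inner loop.
lemma row_boundary (Nx Ny i : Int) (h : i = 0 ∨ i = Ny - 1) (st : List Int) :
    (PySem.List.pyRange 0 Nx 1).foldl (fun st j =>
      if i = 0 ∨ i = Ny - 1 ∨ j = 0 ∨ j = Nx - 1 then st
      else st ++ [i * Nx + j]) st = st := by
  have hc : ∀ (acc : List Int), ∀ j ∈ PySem.List.pyRange 0 Nx 1,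
      (if i = 0 ∨ i = Ny - 1 ∨ j = 0 ∨ j = Nx - 1 then acc else acc ++ [i * Nx + j]) = acc := by
    intro acc j _
    rw [if_pos]; tauto
  rw [PySem.List.foldl_congr_mem _ _ _ _ hc]
  exact List.foldl_fixed _

-- An interior row appends exactly its contiguous block of interior column indices.
lemma row_interior (Nx Ny i : Int) (hi0 : i ≠ 0) (hi1 : i ≠ Ny - 1) (st : List Int) :
    (PySem.List.pyRange 0 Nx 1).foldl (fun st j =>
      if i = 0 ∨ i = Ny - 1 ∨ j = 0 ∨ j = Nx - 1 then st
      else st ++ [i * Nx + j]) st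
    = st ++ PySem.List.pyRange (i * Nx + 1) (i * Nx + Nx - 1) 1 := by
  by_cases hNx : Nx ≤ 1
  · have hblock : PySem.List.pyRange (i * Nx + 1) (i * Nx + Nx - 1) 1 = [] :=
      PySem.List.pyRange_one_eq_nil (by linarith)
    rw [hblock, List.append_nil]
    rcases lt_or_ge Nx 1 with h | h
    · rw [PySem.List.pyRange_one_eq_nil (by omega : Nx ≤ (0:Int))]
      rfl
    · have hNx1 : Nx = 1 := le_antisymm hNx h
      subst hNx1
      have h01 : PySem.List.pyRange (0:Int) 1 1 = [0] := by decide
      rw [h01]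
      simp
  · push Not at hNx
    rw [PySem.List.pyRange_one_append 0 1 Nx (by omega) (by omega),
        PySem.List.pyRange_one_append 1 (Nx - 1) Nx (by omega) (by omega),
        List.foldl_append, List.foldl_append]
    have h0 : PySem.List.pyRange (0:Int) 1 1 = [0] := by decide
    have hlast : PySem.List.pyRange (Nx - 1) Nx 1 = [Nx - 1] := by
      rw [PySem.List.pyRange_one_cons (by omega), PySem.List.pyRange_one_eq_nil (by omega)]
    rw [h0, hlast]
    have hfirst : List.foldl (fun st j =>
        if i = 0 ∨ i = Ny - 1 ∨ j = 0 ∨ j = Nx - 1 then st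
        else st ++ [i * Nx + j]) st [(0:Int)] = st := by
      simp
    rw [hfirst]
    have hmid : ∀ (acc : List Int), ∀ j ∈ PySem.List.pyRange 1 (Nx - 1) 1,
        (if i = 0 ∨ i = Ny - 1 ∨ j = 0 ∨ j = Nx - 1 then acc else acc ++ [i * Nx + j])
        = acc ++ [i * Nx + j] := by
      intro acc j hj
      rw [PySem.List.mem_pyRange_one] at hj
      rw [if_neg]
      push Not
      exact ⟨hi0, hi1, by omega, by omega⟩
    rw [PySem.List.foldl_congr_mem _ _ _ _ hmid,
        PySem.List.foldl_append_singleton_eq_map]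
    have hshift : (PySem.List.pyRange 1 (Nx - 1) 1).map (fun j => i * Nx + j)
        = PySem.List.pyRange (i * Nx + 1) (i * Nx + Nx - 1) 1 := by
      have := pyRange_map_add (i * Nx) 1 (Nx - 1)
      rw [this]
      congr 1
      ring
    rw [hshift]
    simp

theorem gen_in_sten_2nd_eq (Nx Ny : Int) : gen_in_sten_2nd Nx Ny = gen_in_sten_2nd_alt Nx Ny := by
  unfold gen_in_sten_2nd gen_in_sten_2nd_alt
  by_cases hNy : Ny ≤ 1
  · have hB : PySem.List.pyRange (1:Int) (Ny - 1) 1 = [] :=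
      PySem.List.pyRange_one_eq_nil (by omega)
    rw [hB]
    rcases lt_or_ge Ny 1 with h | h
    · rw [PySem.List.pyRange_one_eq_nil (by omega : Ny ≤ (0:Int))]
      rfl
    · have hNy1 : Ny = 1 := le_antisymm hNy h
      subst hNy1
      have h01 : PySem.List.pyRange (0:Int) 1 1 = [0] := by decide
      rw [h01]
      exact row_boundary Nx 1 0 (Or.inl rfl) []
  · push Not at hNy
    rw [PySem.List.pyRange_one_append 0 1 Ny (by omega) (by omega),
        PySem.List.pyRange_one_append 1 (Ny - 1) Ny (by omega) (by omega),
        List.foldl_append, List.foldl_append]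
    have h0 : PySem.List.pyRange (0:Int) 1 1 = [0] := by decide
    have hlast : PySem.List.pyRange (Ny - 1) Ny 1 = [Ny - 1] := by
      rw [PySem.List.pyRange_one_cons (by omega), PySem.List.pyRange_one_eq_nil (by omega)]
    rw [h0, hlast]
    have e1 : List.foldl (fun stencils i =>
        (PySem.List.pyRange 0 Nx 1).foldl (fun stencils j =>
          if i = 0 ∨ i = Ny - 1 ∨ j = 0 ∨ j = Nx - 1 then stencils
          else stencils ++ [i * Nx + j]) stencils) [] [(0:Int)] = [] :=
      row_boundary Nx Ny 0 (Or.inl rfl) []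
    rw [e1]
    have hmid : ∀ (acc : List Int), ∀ i ∈ PySem.List.pyRange 1 (Ny - 1) 1,
        (PySem.List.pyRange 0 Nx 1).foldl (fun st j =>
          if i = 0 ∨ i = Ny - 1 ∨ j = 0 ∨ j = Nx - 1 then st
          else st ++ [i * Nx + j]) acc
        = acc ++ PySem.List.pyRange (i * Nx + 1) (i * Nx + Nx - 1) 1 := by
      intro acc i hi
      rw [PySem.List.mem_pyRange_one] at hi
      exact row_interior Nx Ny i (by omega) (by omega) acc
    rw [PySem.List.foldl_congr_mem _ _ _ _ hmid]
    exact row_boundary Nx Ny (Ny - 1) (Or.inr rfl) _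

-- ===== VERDICT =====
theorem gen_in_sten_2nd_spec : Claim_equal_gen_in_sten_2nd := by
  intro Nx Ny _
  unfold Spec_gen_in_sten_2nd
  exact gen_in_sten_2nd_eq Nx Ny
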